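-- pv_equiv track=rewrite | github.com/Rollandcodes/reddit-pain-point-research-saas | src/scoring.py | _count_emotional_intensity
-- ===== SOURCE A (Python) =====
-- def _count_emotional_intensity(text: str) -> int:
--     """Rate emotional intensity (1-5) based on keywords."""
--     text_lower = text.lower()
--     if any(x in text_lower for x in ["urgent", "critical", "blocking", "can't", "cannot", "impossible"]):
--         return 5
--     if any(x in text_lower for x in ["breaking", "serious", "frustrated", "annoyed"]):
--         return 4
--     if any(x in text_lower for x in ["annoying", "issue", "problem", "trouble"]):
--         return 3
--     if any(x in text_lower for x in ["need", "want", "wish", "would be nice"]):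
--         return 2
--     return 1
-- ===== SOURCE B (Python) =====
-- # Position-scan: walk the lowered text once; at each index, prefix-match the
-- # keyword table and raise the running best level; no per-keyword substring search.
-- _KEYWORD_LEVEL = {
--     "urgent": 5, "critical": 5, "blocking": 5, "can't": 5, "cannot": 5, "impossible": 5,
--     "breaking": 4, "serious": 4, "frustrated": 4, "annoyed": 4,
--     "annoying": 3, "issue": 3, "problem": 3, "trouble": 3,
--     "need": 2, "want": 2, "wish": 2, "would be nice": 2,
-- }
--
-- def _count_emotional_intensity(text: str) -> int:
--     """Rate emotional intensity (1-5) based on keywords."""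
--     t = text.lower()
--     best = 1
--     for i in range(len(t)):
--         for kw, lvl in _KEYWORD_LEVEL.items():
--             if best < lvl and t.startswith(kw, i):
--                 best = lvl
--     return best
-- ===== Notes on version B (the rewrite author's own statement) =====
-- stated objective: alternative
-- what changed: Replaced the four-branch early-return cascade of substring searches by a single left-to-right scan over text positions that prefix-matches a keyword->level table at each index and keeps a running best (skipping keywords that cannot raise it).
import Mathlib
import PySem

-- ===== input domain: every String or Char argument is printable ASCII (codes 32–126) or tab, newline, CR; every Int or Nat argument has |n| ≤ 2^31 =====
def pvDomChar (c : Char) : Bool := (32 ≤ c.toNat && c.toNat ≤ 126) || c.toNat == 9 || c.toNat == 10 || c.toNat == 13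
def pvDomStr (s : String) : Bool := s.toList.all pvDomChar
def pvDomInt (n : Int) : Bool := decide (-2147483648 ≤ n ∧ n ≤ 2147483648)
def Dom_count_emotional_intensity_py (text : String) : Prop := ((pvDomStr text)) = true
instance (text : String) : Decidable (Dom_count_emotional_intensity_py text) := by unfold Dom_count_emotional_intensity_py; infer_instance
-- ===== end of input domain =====

-- B replaces A's early-return cascade of per-keyword substring searches by a single
-- left-to-right scan over text positions, prefix-matching a keyword->level table at
-- each index with a running best (objective: alternative algorithm, same cost class).

-- ===== PORT A =====
def count_emotional_intensity_py (text : String) : Int :=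
  let text_lower := PySem.Str.lower text
  if (["urgent", "critical", "blocking", "can't", "cannot", "impossible"].any
       (fun x => PySem.Str.isIn x text_lower)) then 5
  else if (["breaking", "serious", "frustrated", "annoyed"].any
       (fun x => PySem.Str.isIn x text_lower)) then 4
  else if (["annoying", "issue", "problem", "trouble"].any
       (fun x => PySem.Str.isIn x text_lower)) then 3
  else if (["need", "want", "wish", "would be nice"].any
       (fun x => PySem.Str.isIn x text_lower)) then 2
  else 1

-- ===== PORT B =====
def pvKeywordLevel : List (String × Int) :=
  [("urgent", 5), ("critical", 5), ("blocking", 5), ("can't", 5), ("cannot", 5), ("impossible", 5),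
   ("breaking", 4), ("serious", 4), ("frustrated", 4), ("annoyed", 4),
   ("annoying", 3), ("issue", 3), ("problem", 3), ("trouble", 3),
   ("need", 2), ("want", 2), ("wish", 2), ("would be nice", 2)]

-- Python's t.startswith(kw, i) for 0 <= i < len(t) is exactly a prefix test on the
-- i-th suffix, ported as Chars.startswith on (toList.drop i) — exact on this domain.
def count_emotional_intensity_py_alt (text : String) : Int :=
  let t := PySem.Str.lower text
  (PySem.List.pyRange 0 (PySem.Str.len t) 1).foldl
    (fun best i =>
      pvKeywordLevel.foldl
        (fun b p =>
          if b < p.2 ∧ PySem.Chars.startswith (t.toList.drop i.toNat) p.1.toList = true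
          then p.2 else b)
        best)
    1

-- ===== PRECONDITION & SPEC =====
def Spec_count_emotional_intensity_py (text : String) (out : Int) : Prop := out = count_emotional_intensity_py_alt text
instance (text : String) (out : Int) : Decidable (Spec_count_emotional_intensity_py text out) := by unfold Spec_count_emotional_intensity_py; infer_instance

-- ===== CLAIM (what is proved, stated in full; the proofs are below) =====
def Claim_equal_count_emotional_intensity_py : Prop := ∀ (text : String), Dom_count_emotional_intensity_py text → Spec_count_emotional_intensity_py text (count_emotional_intensity_py text)

-- ===== LEMMAS AND PROOFS =====

-- levels of the table keywords occurring as substrings of L (multiset over positions)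
def pvX (L : List Char) : List Int :=
  (PySem.List.pyRange 0 (L.length : Int) 1).flatMap
    (fun i => (pvKeywordLevel.filter
        (fun p => PySem.Chars.startswith (L.drop i.toNat) p.1.toList)).map (·.2))

-- B's guarded inner loop is a running max over the matching levels at one position
theorem pv_inner (L : List Char) (i : Int) (K : List (String × Int)) (best : Int) :
    K.foldl
      (fun b p =>
        if b < p.2 ∧ PySem.Chars.startswith (L.drop i.toNat) p.1.toList = true
        then p.2 else b) best
    = List.foldl max best
        ((K.filter (fun p => PySem.Chars.startswith (L.drop i.toNat) p.1.toList)).map (·.2)) := by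
  induction K generalizing best with
  | nil => rfl
  | cons p K ih =>
    simp only [List.foldl_cons, List.filter_cons]
    by_cases hpb : PySem.Chars.startswith (L.drop i.toNat) p.1.toList = true
    · by_cases hlt : best < p.2
      · simp [hpb, hlt, ih, max_eq_right (le_of_lt hlt)]
      · simp [hpb, hlt, ih, max_eq_left (le_of_not_gt hlt)]
    · simp [hpb, ih]

-- chaining per-position running maxes is a single max over the concatenation
theorem pv_outer (l : List Int) (g : Int → List Int) (init : Int) :
    l.foldl (fun acc i => List.foldl max acc (g i)) init
      = List.foldl max init (l.flatMap g) := by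
  induction l generalizing init with
  | nil => rfl
  | cons i l ih => simp only [List.foldl_cons, List.flatMap_cons, List.foldl_append, ih]

theorem pv_alt_eq (text : String) :
    count_emotional_intensity_py_alt text
      = List.foldl max 1 (pvX (PySem.Str.lower text).toList) := by
  unfold count_emotional_intensity_py_alt pvX
  simp only [pv_inner, pv_outer, PySem.Str.len_eq]

-- membership in pvX L = some table keyword is a substring of L, at that level
theorem pv_kw_ne_nil : ∀ q ∈ pvKeywordLevel, q.1.toList ≠ [] := by decide

theorem pv_mem_X (L : List Char) (v : Int) :
    v ∈ pvX L ↔ ∃ p ∈ pvKeywordLevel, PySem.Chars.isIn p.1.toList L = true ∧ v = p.2 := by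
  unfold pvX
  simp only [List.mem_flatMap, List.mem_map, List.mem_filter]
  constructor
  · rintro ⟨i, hi, p, ⟨hp, hsw⟩, hv⟩
    refine ⟨p, hp, ?_, hv.symm⟩
    exact (PySem.Chars.exists_prefix_drop_iff_isIn _ _).mp
      ⟨i.toNat, (PySem.Chars.startswith_iff _ _).mp hsw⟩
  · rintro ⟨p, hp, hin, hv⟩
    obtain ⟨j, hjpre⟩ := (PySem.Chars.exists_prefix_drop_iff_isIn _ _).mpr hin
    have hj : j < L.length := by
      by_contra h
      rw [List.drop_eq_nil_of_le (le_of_not_gt h)] at hjpre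
      exact pv_kw_ne_nil p hp (List.prefix_nil.mp hjpre)
    refine ⟨(j : Int), ?_, p, ⟨hp, ?_⟩, hv.symm⟩
    · exact (PySem.List.mem_pyRange_one).mpr ⟨Int.natCast_nonneg j, by exact_mod_cast hj⟩
    · simpa [(PySem.Chars.startswith_iff _ _)] using hjpre

-- membership regrouped by level, against the four group tests of A's cascade
theorem pv_mem_X_groups (L : List Char) (v : Int) :
    v ∈ pvX L ↔
      (v = 5 ∧ (["urgent", "critical", "blocking", "can't", "cannot", "impossible"].any
        (fun x => PySem.Chars.isIn x.toList L)) = true) ∨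
      (v = 4 ∧ (["breaking", "serious", "frustrated", "annoyed"].any
        (fun x => PySem.Chars.isIn x.toList L)) = true) ∨
      (v = 3 ∧ (["annoying", "issue", "problem", "trouble"].any
        (fun x => PySem.Chars.isIn x.toList L)) = true) ∨
      (v = 2 ∧ (["need", "want", "wish", "would be nice"].any
        (fun x => PySem.Chars.isIn x.toList L)) = true) := by
  rw [pv_mem_X]
  simp only [List.any_cons, List.any_nil, Bool.or_eq_true, Bool.false_eq_true, or_false]
  constructor
  · rintro ⟨p, hp, hin, hv⟩
    subst hv
    simp only [pvKeywordLevel, List.mem_cons, List.not_mem_nil, or_false] at hp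
    rcases hp with rfl | rfl | rfl | rfl | rfl | rfl | rfl | rfl | rfl | rfl | rfl | rfl |
      rfl | rfl | rfl | rfl | rfl | rfl
    · exact Or.inl (⟨rfl, Or.inl (hin)⟩)
    · exact Or.inl (⟨rfl, Or.inr (Or.inl (hin))⟩)
    · exact Or.inl (⟨rfl, Or.inr (Or.inr (Or.inl (hin)))⟩)
    · exact Or.inl (⟨rfl, Or.inr (Or.inr (Or.inr (Or.inl (hin))))⟩)
    · exact Or.inl (⟨rfl, Or.inr (Or.inr (Or.inr (Or.inr (Or.inl (hin)))))⟩)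
    · exact Or.inl (⟨rfl, Or.inr (Or.inr (Or.inr (Or.inr (Or.inr (hin)))))⟩)
    · exact Or.inr (Or.inl (⟨rfl, Or.inl (hin)⟩))
    · exact Or.inr (Or.inl (⟨rfl, Or.inr (Or.inl (hin))⟩))
    · exact Or.inr (Or.inl (⟨rfl, Or.inr (Or.inr (Or.inl (hin)))⟩))
    · exact Or.inr (Or.inl (⟨rfl, Or.inr (Or.inr (Or.inr (hin)))⟩))
    · exact Or.inr (Or.inr (Or.inl (⟨rfl, Or.inl (hin)⟩)))
    · exact Or.inr (Or.inr (Or.inl (⟨rfl, Or.inr (Or.inl (hin))⟩)))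
    · exact Or.inr (Or.inr (Or.inl (⟨rfl, Or.inr (Or.inr (Or.inl (hin)))⟩)))
    · exact Or.inr (Or.inr (Or.inl (⟨rfl, Or.inr (Or.inr (Or.inr (hin)))⟩)))
    · exact Or.inr (Or.inr (Or.inr (⟨rfl, Or.inl (hin)⟩)))
    · exact Or.inr (Or.inr (Or.inr (⟨rfl, Or.inr (Or.inl (hin))⟩)))
    · exact Or.inr (Or.inr (Or.inr (⟨rfl, Or.inr (Or.inr (Or.inl (hin)))⟩)))
    · exact Or.inr (Or.inr (Or.inr (⟨rfl, Or.inr (Or.inr (Or.inr (hin)))⟩)))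
  · rintro (⟨hv, h⟩ | ⟨hv, h⟩ | ⟨hv, h⟩ | ⟨hv, h⟩) <;> subst hv
    · rcases h with h | h | h | h | h | h
      · exact ⟨("urgent", 5), by decide, h, rfl⟩
      · exact ⟨("critical", 5), by decide, h, rfl⟩
      · exact ⟨("blocking", 5), by decide, h, rfl⟩
      · exact ⟨("can't", 5), by decide, h, rfl⟩
      · exact ⟨("cannot", 5), by decide, h, rfl⟩
      · exact ⟨("impossible", 5), by decide, h, rfl⟩
    · rcases h with h | h | h | h
      · exact ⟨("breaking", 4), by decide, h, rfl⟩
      · exact ⟨("serious", 4), by decide, h, rfl⟩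
      · exact ⟨("frustrated", 4), by decide, h, rfl⟩
      · exact ⟨("annoyed", 4), by decide, h, rfl⟩
    · rcases h with h | h | h | h
      · exact ⟨("annoying", 3), by decide, h, rfl⟩
      · exact ⟨("issue", 3), by decide, h, rfl⟩
      · exact ⟨("problem", 3), by decide, h, rfl⟩
      · exact ⟨("trouble", 3), by decide, h, rfl⟩
    · rcases h with h | h | h | h
      · exact ⟨("need", 2), by decide, h, rfl⟩
      · exact ⟨("want", 2), by decide, h, rfl⟩
      · exact ⟨("wish", 2), by decide, h, rfl⟩
      · exact ⟨("would be nice", 2), by decide, h, rfl⟩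

-- A's cascade equals the positional running max, for any character list
set_option maxHeartbeats 1600000 in
theorem pv_main (L : List Char) :
    (if (["urgent", "critical", "blocking", "can't", "cannot", "impossible"].any
        (fun x => PySem.Chars.isIn x.toList L)) = true then (5:Int)
     else if (["breaking", "serious", "frustrated", "annoyed"].any
        (fun x => PySem.Chars.isIn x.toList L)) = true then 4
     else if (["annoying", "issue", "problem", "trouble"].any
        (fun x => PySem.Chars.isIn x.toList L)) = true then 3
     else if (["need", "want", "wish", "would be nice"].any
        (fun x => PySem.Chars.isIn x.toList L)) = true then 2
     else 1) = List.foldl max 1 (pvX L) := by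
  have hle := PySem.List.le_foldl_max (pvX L) 1
  have hBcases : List.foldl max 1 (pvX L) = 1 ∨
      ((List.foldl max 1 (pvX L) = 5 ∧ (["urgent", "critical", "blocking", "can't", "cannot", "impossible"].any
        (fun x => PySem.Chars.isIn x.toList L)) = true) ∨
      (List.foldl max 1 (pvX L) = 4 ∧ (["breaking", "serious", "frustrated", "annoyed"].any
        (fun x => PySem.Chars.isIn x.toList L)) = true) ∨
      (List.foldl max 1 (pvX L) = 3 ∧ (["annoying", "issue", "problem", "trouble"].any
        (fun x => PySem.Chars.isIn x.toList L)) = true) ∨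
      (List.foldl max 1 (pvX L) = 2 ∧ (["need", "want", "wish", "would be nice"].any
        (fun x => PySem.Chars.isIn x.toList L)) = true)) := by
    rcases PySem.List.foldl_max_mem (pvX L) 1 with h | h
    · exact Or.inl h
    · exact Or.inr ((pv_mem_X_groups L _).mp h)
  have hlb5 : (["urgent", "critical", "blocking", "can't", "cannot", "impossible"].any
      (fun x => PySem.Chars.isIn x.toList L)) = true → 5 ≤ List.foldl max 1 (pvX L) :=
    fun h => hle.2 5 ((pv_mem_X_groups L 5).mpr (Or.inl ⟨rfl, h⟩))
  have hlb4 : (["breaking", "serious", "frustrated", "annoyed"].any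
      (fun x => PySem.Chars.isIn x.toList L)) = true → 4 ≤ List.foldl max 1 (pvX L) :=
    fun h => hle.2 4 ((pv_mem_X_groups L 4).mpr (Or.inr (Or.inl ⟨rfl, h⟩)))
  have hlb3 : (["annoying", "issue", "problem", "trouble"].any
      (fun x => PySem.Chars.isIn x.toList L)) = true → 3 ≤ List.foldl max 1 (pvX L) :=
    fun h => hle.2 3 ((pv_mem_X_groups L 3).mpr (Or.inr (Or.inr (Or.inl ⟨rfl, h⟩))))
  have hlb2 : (["need", "want", "wish", "would be nice"].any
      (fun x => PySem.Chars.isIn x.toList L)) = true → 2 ≤ List.foldl max 1 (pvX L) :=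
    fun h => hle.2 2 ((pv_mem_X_groups L 2).mpr (Or.inr (Or.inr (Or.inr ⟨rfl, h⟩))))
  by_cases h5 : (["urgent", "critical", "blocking", "can't", "cannot", "impossible"].any
      (fun x => PySem.Chars.isIn x.toList L)) = true <;>
  by_cases h4 : (["breaking", "serious", "frustrated", "annoyed"].any
      (fun x => PySem.Chars.isIn x.toList L)) = true <;>
  by_cases h3 : (["annoying", "issue", "problem", "trouble"].any
      (fun x => PySem.Chars.isIn x.toList L)) = true <;>
  by_cases h2 : (["need", "want", "wish", "would be nice"].any
      (fun x => PySem.Chars.isIn x.toList L)) = true <;>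
  simp only [h5, h4, h3, h2, Bool.false_eq_true, if_true, if_false] <;>
  rcases hBcases with h | ⟨h, hc⟩ | ⟨h, hc⟩ | ⟨h, hc⟩ | ⟨h, hc⟩ <;>
  first
    | omega
    | (exact absurd hc h5)
    | (exact absurd hc h4)
    | (exact absurd hc h3)
    | (exact absurd hc h2)
    | (have := hlb5 h5; omega)
    | (have := hlb4 h4; omega)
    | (have := hlb3 h3; omega)
    | (have := hlb2 h2; omega)

-- ===== VERDICT (by name: the statement is the Claim_ definition above) =====
theorem count_emotional_intensity_py_spec : Claim_equal_count_emotional_intensity_py := by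
  intro text _
  unfold Spec_count_emotional_intensity_py
  rw [pv_alt_eq]
  unfold count_emotional_intensity_py
  simp only [PySem.Str.isIn_eq]
  exact pv_main _
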